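-- pv_equiv track=rewrite | github.com/miliar/Code_Jam_Webscraper | solutions_python/solutions_year15_round0_nr1/586.py | solve
-- ===== SOURCE A (Python) =====
-- def solve(shyness):
--     friends = 0
--     audience = shyness[0]
--     for i, n in enumerate(shyness[1:], start=1):
--         if audience < i:
--             friends += i-audience
--             audience = i
--         audience += n
--     return friends
-- ===== SOURCE B (Python) =====
-- def solve(shyness):
--     prefix = []
--     total = 0
--     for n in shyness:
--         total += n
--         prefix.append(total)
--     deficits = [i - p for i, p in enumerate(prefix[:-1], 1)]
--     return max([0] + deficits)
-- ===== Notes on version B (the rewrite author's own statement) =====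
-- stated objective: alternative
-- what changed: Replaces A's greedy loop that mutates a refilled 'audience' counter with a two-pass formulation: build the prefix sums, then return the maximum deficit max([0] + [i - prefix[i-1]]).
import Mathlib
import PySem

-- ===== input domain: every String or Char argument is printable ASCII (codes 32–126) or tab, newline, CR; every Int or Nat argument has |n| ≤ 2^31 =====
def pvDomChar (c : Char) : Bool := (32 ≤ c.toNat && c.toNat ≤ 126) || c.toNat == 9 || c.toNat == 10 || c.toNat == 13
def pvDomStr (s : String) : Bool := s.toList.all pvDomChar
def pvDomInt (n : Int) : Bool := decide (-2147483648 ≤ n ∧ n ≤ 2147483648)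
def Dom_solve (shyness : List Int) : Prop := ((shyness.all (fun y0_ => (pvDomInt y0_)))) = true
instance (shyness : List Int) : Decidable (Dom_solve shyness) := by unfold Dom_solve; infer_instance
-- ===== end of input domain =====

-- B recomputes the answer as the maximum shortfall over prefix sums (two passes, no
-- audience-refill mutation); same cost, different decomposition.

-- ===== PORT A =====
def solve (shyness : List Int) : Int :=
  match shyness with
  | [] => 0  -- Python raises IndexError at shyness[0]; excluded by Pre_solve
  | a :: _ =>
    let rest := PySem.List.slice shyness (some 1) none   -- shyness[1:]
    let st := (PySem.List.enumerate rest 1).foldl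
      (fun (st : Int × Int) p =>
        if st.2 < p.1 then (st.1 + (p.1 - st.2), p.1 + p.2) else (st.1, st.2 + p.2))
      (0, a)
    st.1

-- ===== PORT B =====
def solve_alt (shyness : List Int) : Int :=
  let pr := (shyness.foldl (fun (st : List Int × Int) n =>
      (st.1 ++ [st.2 + n], st.2 + n)) (([] : List Int), (0 : Int))).1
  let deficits := (PySem.List.enumerate (PySem.List.slice pr none (some (-1))) 1).map
      (fun ip => ip.1 - ip.2)
  (PySem.List.max? ((0 : Int) :: deficits) (fun y => y)).getD 0  -- list is nonempty, so max() cannot raise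

-- ===== PRECONDITION & SPEC =====
-- Pre_ excludes only the empty list, on which Python A raises IndexError.
def Pre_solve (shyness : List Int) : Prop := shyness ≠ []
instance (shyness : List Int) : Decidable (Pre_solve shyness) := by unfold Pre_solve; infer_instance
def pvWitness_solve : List Int := [1, 0, 3]

def Spec_solve (shyness : List Int) (out : Int) : Prop := out = solve_alt shyness
instance (shyness : List Int) (out : Int) : Decidable (Spec_solve shyness out) := by unfold Spec_solve; infer_instance

-- ===== CLAIM (what is proved, stated in full; the proofs are below) =====
def Claim_equal_solve : Prop := ∀ (shyness : List Int), Dom_solve shyness → Pre_solve shyness → Spec_solve shyness (solve shyness)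

-- ===== LEMMAS AND PROOFS =====

-- prefix sums starting from running total t
def pvScan (t : Int) : List Int → List Int
  | [] => []
  | n :: xs => (t + n) :: pvScan (t + n) xs

-- the deficit sequence: head i - s, then index +1, running sum +n
def pvD (i s : Int) : List Int → List Int
  | [] => []
  | n :: xs => (i - s) :: pvD (i + 1) (s + n) xs

lemma pv_prefix_fold (xs : List Int) : ∀ (acc : List Int) (t : Int),
    xs.foldl (fun (st : List Int × Int) n => (st.1 ++ [st.2 + n], st.2 + n)) (acc, t)
      = (acc ++ pvScan t xs, t + xs.sum) := by
  induction xs with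
  | nil => intro acc t; simp [pvScan]
  | cons n xs ih =>
    intro acc t
    simp only [List.foldl_cons, ih, pvScan, List.sum_cons]
    rw [Prod.mk.injEq]
    exact ⟨by simp, by ring⟩

lemma pv_enum_scan (xs : List Int) : ∀ (c i : Int),
    ((PySem.List.enumerate ((c :: pvScan c xs).dropLast) i).map (fun ip => ip.1 - ip.2))
      = pvD i c xs := by
  induction xs with
  | nil => intro c i; simp [pvScan, pvD, PySem.List.enumerate_nil]
  | cons n xs ih =>
    intro c i
    simp only [pvScan, pvD, List.dropLast_cons₂, PySem.List.enumerate_cons, List.map_cons]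
    exact congrArg _ (ih (c + n) (i + 1))

lemma pv_fold_A (xs : List Int) : ∀ (i friends audience : Int),
    ((PySem.List.enumerate xs i).foldl
      (fun (st : Int × Int) p =>
        if st.2 < p.1 then (st.1 + (p.1 - st.2), p.1 + p.2) else (st.1, st.2 + p.2))
      (friends, audience)).1
    = List.foldl max friends (pvD i (audience - friends) xs) := by
  induction xs with
  | nil => intro i friends audience; simp [PySem.List.enumerate_nil, pvD]
  | cons n xs ih =>
    intro i friends audience
    simp only [PySem.List.enumerate_cons, List.foldl_cons, pvD]
    by_cases h : audience < i
    · rw [if_pos h, ih]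
      rw [show (i + n) - (friends + (i - audience)) = (audience - friends) + n from by ring,
          show friends + (i - audience) = max friends (i - (audience - friends)) from by omega]
    · rw [if_neg h, ih]
      rw [show max friends (i - (audience - friends)) = friends from by omega,
          show audience + n - friends = (audience - friends) + n from by ring]

-- ===== VERDICT (by name: the statement is the Claim_ definition above) =====
theorem solve_spec : Claim_equal_solve := by
  intro shyness _ hpre
  unfold Spec_solve
  match shyness with
  | [] => exact absurd rfl hpre
  | a :: rest =>
    show solve (a :: rest) = solve_alt (a :: rest)
    simp only [solve, solve_alt, PySem.List.slice_from_one, List.tail_cons,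
      pv_prefix_fold, List.nil_append, PySem.List.slice_to_neg_one]
    rw [show pvScan 0 (a :: rest) = a :: pvScan a rest from by simp [pvScan]]
    rw [pv_enum_scan rest a 1, PySem.List.max?_id_cons, Option.getD_some]
    rw [pv_fold_A rest 1 0 a]
    norm_num
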